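-- pv_equiv track=rewrite | github.com/AKI-NANA/n3-frontend_new | original-php/yahoo_auction_complete/02_scraping/asin_upload/asin_validation_service.py | _validate_jan_checksum
-- ===== SOURCE A (Python) =====
-- def _validate_jan_checksum(jan_code: str) -> bool:
--     """JANコードチェックサム検証"""
--     try:
--         if len(jan_code) in [8, 12, 13, 14]:
--             digits = [int(d) for d in jan_code[:-1]]
--             check_digit = int(jan_code[-1])
--
--             if len(jan_code) == 13:  # EAN-13
--                 sum_odd = sum(digits[i] for i in range(0, len(digits), 2))
--                 sum_even = sum(digits[i] for i in range(1, len(digits), 2))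
--                 calculated_check = (10 - ((sum_odd + sum_even * 3) % 10)) % 10
--             else:  # その他
--                 weighted_sum = sum(digits[i] * (3 if i % 2 else 1) for i in range(len(digits)))
--                 calculated_check = (10 - (weighted_sum % 10)) % 10
--
--             return check_digit == calculated_check
--     except:
--         pass
--     return False
-- ===== SOURCE B (Python) =====
-- def _validate_jan_checksum(jan_code: str) -> bool:
--     """Right-to-left DFA over the reversed code: state = running checksum mod 10,
--     weight alternates via w -> 4-w; digits via ord() after an isdigit() pre-check."""
--     if len(jan_code) not in (8, 12, 13, 14) or not jan_code.isdigit():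
--         return False
--     rev = jan_code[::-1]
--     state = ord(rev[0]) - 48                      # check digit, weight 1
--     weight = 3 if len(jan_code) == 13 else 1      # weight of rightmost payload digit
--     for c in rev[1:]:
--         state = (state + (ord(c) - 48) * weight) % 10
--         weight = 4 - weight
--     return state == 0
-- ===== Notes on version B (the rewrite author's own statement) =====
-- stated objective: alternative
-- what changed: B replaces A's index-based weighted sums and derive-expected-check-digit-then-compare (with an EAN-13 special case) by a right-to-left DFA over the reversed string: an isdigit() pre-check instead of try/except, digits via ord(), a (checksum mod 10, weight) state updated per character, accepting iff the final state is 0.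
import Mathlib
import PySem

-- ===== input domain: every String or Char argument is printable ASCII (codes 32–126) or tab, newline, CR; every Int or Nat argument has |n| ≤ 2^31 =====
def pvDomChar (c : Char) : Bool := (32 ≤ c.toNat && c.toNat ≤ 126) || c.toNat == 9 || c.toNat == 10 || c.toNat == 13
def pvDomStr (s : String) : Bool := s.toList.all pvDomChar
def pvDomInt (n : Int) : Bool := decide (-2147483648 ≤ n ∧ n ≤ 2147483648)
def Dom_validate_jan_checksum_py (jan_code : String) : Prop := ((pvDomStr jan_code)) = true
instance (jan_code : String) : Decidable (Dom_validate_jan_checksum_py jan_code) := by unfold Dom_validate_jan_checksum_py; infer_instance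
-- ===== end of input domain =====

-- B replaces A's per-index weighted sum and derive-then-compare check with a right-to-left
-- scan of the reversed code: an isdigit pre-check, ord() arithmetic, a (sum mod 10, weight)
-- state updated per digit, accepting iff the final state is 0; same values, no speed claim.

-- ===== PORT A =====
-- int(d) for a single character d
def pvIntOfCharA? (c : Char) : Option Int := PySem.Int.ofChars? [c]
def validate_jan_checksum_py (jan_code : String) : Bool :=
  let cs := jan_code.toList
  if [8, 12, 13, 14].contains cs.length then
    -- digits = [int(d) for d in jan_code[:-1]]; check_digit = int(jan_code[-1]); any failure → except → False
    match (PySem.List.slice cs none (some (-1))).mapM pvIntOfCharA?,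
          (PySem.List.pyGet? cs (-1)).bind pvIntOfCharA? with
    | some digits, some check_digit =>
      if cs.length = 13 then
        let sum_odd := ((PySem.List.pyRange 0 digits.length 2).map
            (fun i => PySem.List.pyGetD digits i 0)).sum
        let sum_even := ((PySem.List.pyRange 1 digits.length 2).map
            (fun i => PySem.List.pyGetD digits i 0)).sum
        let calculated_check := PySem.Int.mod (10 - PySem.Int.mod (sum_odd + sum_even * 3) 10) 10
        check_digit == calculated_check
      else
        let weighted_sum := ((PySem.List.pyRange 0 digits.length 1).map
            (fun i => PySem.List.pyGetD digits i 0 * (if PySem.Int.mod i 2 ≠ 0 then 3 else 1))).sum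
        let calculated_check := PySem.Int.mod (10 - PySem.Int.mod weighted_sum 10) 10
        check_digit == calculated_check
    | _, _ => false
  else false

-- ===== PORT B =====
-- DFA step: state = (running checksum mod 10, weight of the next digit); digit via ord(c)-48
def pvStepB (st : Int × Int) (c : Char) : Int × Int :=
  (PySem.Int.mod (st.1 + ((c.toNat : Int) - 48) * st.2) 10, 4 - st.2)

def validate_jan_checksum_py_alt (jan_code : String) : Bool :=
  let cs := jan_code.toList
  if ¬ [8, 12, 13, 14].contains cs.length ∨ ¬ PySem.Chars.strIsdigit cs then false
  else
    -- rev = jan_code[::-1]  (step -1 never raises; none is unreachable)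
    match PySem.List.slice? cs none none (-1) with
    | none => false
    | some rev =>
      -- state = ord(rev[0]) - 48  (rev[0] cannot raise: length ≥ 8)
      match PySem.List.pyGet? rev 0 with
      | none => false
      | some c0 =>
        let state0 : Int := (c0.toNat : Int) - 48
        let weight0 : Int := if cs.length = 13 then 3 else 1
        let res := (PySem.List.slice rev (some 1) none).foldl pvStepB (state0, weight0)
        res.1 == 0

-- ===== PRECONDITION & SPEC =====
def Spec_validate_jan_checksum_py (jan_code : String) (out : Bool) : Prop := out = validate_jan_checksum_py_alt jan_code
instance (jan_code : String) (out : Bool) : Decidable (Spec_validate_jan_checksum_py jan_code out) := by unfold Spec_validate_jan_checksum_py; infer_instance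

-- ===== CLAIM (what is proved, stated in full; the proofs are below) =====
def Claim_equal_validate_jan_checksum_py : Prop := ∀ (jan_code : String), Dom_validate_jan_checksum_py jan_code → Spec_validate_jan_checksum_py jan_code (validate_jan_checksum_py jan_code)

-- ===== LEMMAS AND PROOFS =====

-- weight of position i counted from the left: 1 on even, 3 on odd
def wt (i : Int) : Int := if PySem.Int.mod i 2 = 0 then 1 else 3

-- left-to-right alternating weighted sum starting with weight w
def lw (xs : List Int) (w : Int) : Int :=
  match xs with
  | [] => 0
  | d :: r => d * w + lw r (4 - w)

-- int() of any single domain character: the digit value on '0'..'9', ValueError otherwise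
lemma char_int (c : Char) (hc : pvDomChar c = true) :
    pvIntOfCharA? c = if PySem.Chars.isdigit c then some ((c.toNat : Int) - 48) else none := by
  have hlt : c.toNat < 127 := by
    simp [pvDomChar] at hc
    omega
  have key : ∀ n : Fin 127,
      pvIntOfCharA? (Char.ofNat n.val)
        = if PySem.Chars.isdigit (Char.ofNat n.val) then some ((n.val : Int) - 48) else none := by
    decide
  have := key ⟨c.toNat, hlt⟩
  simpa [Char.ofNat_toNat] using this

-- digit bounds from isdigit
lemma isdigit_bounds (c : Char) (h : PySem.Chars.isdigit c = true) :
    48 ≤ c.toNat ∧ c.toNat ≤ 57 := by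
  simp [PySem.Chars.isdigit, Char.le_def] at h
  exact h

-- mapM over an all-digit list yields the ord()-48 values
lemma mapM_digits (ds : List Char) (hd : ∀ c ∈ ds, pvDomChar c = true)
    (hdig : ∀ c ∈ ds, PySem.Chars.isdigit c = true) :
    ds.mapM pvIntOfCharA? = some (ds.map (fun c => (c.toNat : Int) - 48)) := by
  induction ds with
  | nil => simp
  | cons x t ih =>
    rw [List.mapM_cons, char_int x (hd x (by simp)), if_pos (hdig x (by simp)),
      ih (fun c hc => hd c (by simp [hc])) (fun c hc => hdig c (by simp [hc]))]
    simp

-- mapM fails as soon as one element fails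
lemma mapM_none (ds : List Char) (c : Char) (hc : c ∈ ds)
    (hn : pvIntOfCharA? c = none) : ds.mapM pvIntOfCharA? = none := by
  induction ds with
  | nil => simp at hc
  | cons x t ih =>
    rw [List.mapM_cons]
    rcases List.mem_cons.mp hc with h | h
    · subst h; simp [hn]
    · cases hx : pvIntOfCharA? x with
      | none => rfl
      | some d => simp [ih h]

-- "check == (10 - w % 10) % 10"  ⟺  "(w + check) % 10 == 0" for a digit check
lemma mod_equiv (S c : Int) (h0 : 0 ≤ c) (h9 : c < 10) :
    (c == PySem.Int.mod (10 - PySem.Int.mod S 10) 10) = (PySem.Int.mod (S + c) 10 == 0) := by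
  have e : ∀ a : Int, PySem.Int.mod a 10 = a % 10 :=
    fun a => PySem.Int.mod_eq_emod_of_pos (by norm_num)
  rw [e, e, e, Bool.eq_iff_iff]
  simp only [beq_iff_eq]
  omega

-- the weight flips under i ↦ i - 1
lemma wt_flip (i : Int) : 4 - wt i = wt (i - 1) := by
  unfold wt
  have e : ∀ a : Int, PySem.Int.mod a 2 = a % 2 :=
    fun a => PySem.Int.mod_eq_emod_of_pos (by norm_num)
  rw [e, e]
  rcases Int.emod_two_eq_zero_or_one i with h | h <;>
    rcases Int.emod_two_eq_zero_or_one (i - 1) with h' | h' <;>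
    simp [h, h'] <;> omega

-- A's generic weighted sum equals the enumerate sum
lemma S_else (digits : List Int) :
    ((PySem.List.pyRange 0 digits.length 1).map
        (fun i => PySem.List.pyGetD digits i 0 * (if PySem.Int.mod i 2 ≠ 0 then 3 else 1))).sum
    = ((PySem.List.enumerate digits 0).map (fun p => p.2 * wt p.1)).sum := by
  rw [PySem.List.enumerate_eq_map_pyRange (d := 0), List.map_map]
  simp only [PySem.List.len]
  apply congrArg List.sum
  apply List.map_congr_left
  intro i _
  have e : PySem.Int.mod i 2 = i % 2 := PySem.Int.mod_eq_emod_of_pos (by norm_num)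
  unfold wt
  rw [e]
  rcases Int.emod_two_eq_zero_or_one i with h | h <;> simp [h]

-- A's EAN-13 odd/even split equals the enumerate sum (12 payload digits)
lemma S_13 (digits : List Int) (h : digits.length = 12) :
    ((PySem.List.pyRange 0 digits.length 2).map (fun i => PySem.List.pyGetD digits i 0)).sum
      + ((PySem.List.pyRange 1 digits.length 2).map (fun i => PySem.List.pyGetD digits i 0)).sum * 3
    = ((PySem.List.enumerate digits 0).map (fun p => p.2 * wt p.1)).sum := by
  rw [PySem.List.enumerate_eq_map_pyRange (d := 0), List.map_map]
  simp only [PySem.List.len, h, Nat.cast_ofNat]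
  rw [show PySem.List.pyRange 0 12 2 = [0,2,4,6,8,10] from by decide,
      show PySem.List.pyRange 1 12 2 = [1,3,5,7,9,11] from by decide,
      show PySem.List.pyRange 0 12 1 = [0,1,2,3,4,5,6,7,8,9,10,11] from by decide]
  simp only [List.map_cons, List.map_nil, List.sum_cons, List.sum_nil, Function.comp,
    show wt 0 = 1 from by decide, show wt 1 = 3 from by decide,
    show wt 2 = 1 from by decide, show wt 3 = 3 from by decide,
    show wt 4 = 1 from by decide, show wt 5 = 3 from by decide,
    show wt 6 = 1 from by decide, show wt 7 = 3 from by decide,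
    show wt 8 = 1 from by decide, show wt 9 = 3 from by decide,
    show wt 10 = 1 from by decide, show wt 11 = 3 from by decide]
  ring

-- enumerate over an appended last element
lemma enumerate_append_singleton (xs : List Int) (d : Int) (s : Int) :
    PySem.List.enumerate (xs ++ [d]) s
      = PySem.List.enumerate xs s ++ [(s + (xs.length : Int), d)] := by
  induction xs generalizing s with
  | nil => simp [PySem.List.enumerate_cons, PySem.List.enumerate]
  | cons x t ih =>
    rw [List.cons_append, PySem.List.enumerate_cons, PySem.List.enumerate_cons, ih]
    simp
    ring_nf

-- the reversed alternating sum, started at the weight of the LAST left position,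
-- is the left-to-right 1/3-weighted (enumerate) sum
lemma lw_reverse (vs : List Int) :
    lw vs.reverse (wt ((vs.length : Int) - 1))
      = ((PySem.List.enumerate vs 0).map (fun p => p.2 * wt p.1)).sum := by
  induction vs using List.reverseRecOn with
  | nil => simp [lw, PySem.List.enumerate]
  | append_singleton es d ih =>
    rw [List.reverse_append, List.reverse_singleton, List.singleton_append]
    rw [enumerate_append_singleton]
    simp only [lw, List.length_append, List.length_singleton, List.map_append, List.sum_append,
      List.map_cons, List.map_nil, List.sum_cons, List.sum_nil, zero_add, add_zero]
    have hsimp : ((es.length + 1 : Nat) : Int) - 1 = (es.length : Int) := by push_cast; ring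
    rw [hsimp, wt_flip]
    have : (es.length : Int) - 1 = (es.length : Int) - 1 := rfl
    rw [ih]
    ring

-- the DFA fold over a nonempty digit list computes the alternating sum mod 10
lemma fold_dfa (xs : List Int) (t w : Int) :
    ((xs.foldl (fun (st : Int × Int) d =>
        (PySem.Int.mod (st.1 + d * st.2) 10, 4 - st.2)) (t, w)).1)
      = if xs = [] then t else PySem.Int.mod (t + lw xs w) 10 := by
  induction xs generalizing t w with
  | nil => simp
  | cons x r ih =>
    rw [List.foldl_cons, ih]
    have e : ∀ a : Int, PySem.Int.mod a 10 = a % 10 :=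
      fun a => PySem.Int.mod_eq_emod_of_pos (by norm_num)
    cases r with
    | nil => simp [lw]
    | cons y r' =>
      simp only [if_neg (by simp : (y :: r' : List Int) ≠ []), if_neg (by simp : (x :: y :: r' : List Int) ≠ [])]
      rw [e, e, e]
      have : lw (x :: y :: r') w = x * w + lw (y :: r') (4 - w) := rfl
      rw [this]
      omega

-- ===== VERDICT (by name: the statement is the Claim_ definition above) =====
theorem validate_jan_checksum_py_spec : Claim_equal_validate_jan_checksum_py := by
  intro s hdom
  unfold Spec_validate_jan_checksum_py validate_jan_checksum_py validate_jan_checksum_py_alt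
  by_cases hl : [8, 12, 13, 14].contains s.toList.length = true
  · have hne : s.toList ≠ [] := by
      intro h
      rw [h] at hl
      exact absurd hl (by decide)
    obtain ⟨ds, l, hcs⟩ : ∃ ds l, s.toList = ds ++ [l] :=
      ⟨s.toList.dropLast, s.toList.getLast hne, (List.dropLast_append_getLast hne).symm⟩
    have hdomall : ∀ c ∈ s.toList, pvDomChar c = true := by
      have : s.toList.all pvDomChar = true := hdom
      simpa [List.all_eq_true] using this
    rw [hcs] at hl hdomall ⊢
    rw [if_pos hl]
    by_cases hdig : PySem.Chars.strIsdigit (ds ++ [l]) = true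
    · -- all characters are digits: both sides compute the weighted checksum
      have hdigall : ∀ c ∈ ds ++ [l], PySem.Chars.isdigit c = true := by
        have h2 := hdig
        unfold PySem.Chars.strIsdigit at h2
        rw [Bool.and_eq_true] at h2
        exact List.all_eq_true.mp h2.2
      rw [if_neg (by
        simp [hdig]
        intro h7 h11 h12
        have h := (by simpa using hl :
          ds.length = 7 ∨ ds.length = 11 ∨ ds.length = 12 ∨ ds.length = 13)
        omega)]
      have hget : PySem.List.pyGet? (l :: ds.reverse) 0 = some l := by
        simp [PySem.List.pyGet?, PySem.List.pyIdx?]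
      simp only [PySem.List.slice?_none_none_neg_one, List.reverse_append,
        List.reverse_singleton, List.singleton_append, hget,
        PySem.List.slice_from_one, List.tail_cons]
      -- A's conversions succeed with the ord()-48 values
      have hm : ds.mapM pvIntOfCharA? = some (ds.map (fun c => (c.toNat : Int) - 48)) :=
        mapM_digits ds (fun c hc => hdomall c (by simp [hc]))
          (fun c hc => hdigall c (by simp [hc]))
      have hlc : pvIntOfCharA? l = some ((l.toNat : Int) - 48) := by
        rw [char_int l (hdomall l (by simp)), if_pos (hdigall l (by simp))]
      rw [PySem.List.slice_to_neg_one, List.dropLast_concat,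
        PySem.List.pyGet?_neg_one_append_singleton, hm]
      simp only [Option.bind_some, hlc]
      set vs := ds.map (fun c => (c.toNat : Int) - 48) with hvs
      set check : Int := (l.toNat : Int) - 48 with hcheck
      have hb : 0 ≤ check ∧ check < 10 := by
        have := isdigit_bounds l (hdigall l (by simp))
        constructor <;> [skip; skip] <;> rw [hcheck] <;> omega
      -- B's fold equals mod (check + lw) 10
      have hdsne : ds ≠ [] := by
        intro h
        subst h
        simp at hl
      have hrevne : ds.reverse.map (fun c => (c.toNat : Int) - 48) ≠ [] := by
        simp [hdsne]
      have hfold : ∀ w : Int,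
          ((ds.reverse.foldl pvStepB (check, w)).1)
            = PySem.Int.mod (check + lw (vs.reverse) w) 10 := by
        intro w
        have hmap : ds.reverse.foldl pvStepB (check, w)
            = (ds.reverse.map (fun c => (c.toNat : Int) - 48)).foldl
                (fun (st : Int × Int) d =>
                  (PySem.Int.mod (st.1 + d * st.2) 10, 4 - st.2)) (check, w) := by
          rw [List.foldl_map]
          rfl
        rw [hmap, fold_dfa, if_neg hrevne, hvs, List.map_reverse]
      -- lengths
      have hlen : ((ds ++ [l]).length = 13) ↔ (ds.length = 12) := by
        simp
      have hvslen : vs.length = ds.length := by simp [hvs]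
      by_cases h13 : (ds ++ [l]).length = 13
      · rw [if_pos h13, if_pos h13]
        have hd12 : vs.length = 12 := by rw [hvslen]; exact hlen.mp h13
        rw [mod_equiv _ check hb.1 hb.2, S_13 vs hd12, hfold 3]
        have hw : wt ((vs.length : Int) - 1) = 3 := by rw [hd12]; decide
        rw [← hw, lw_reverse]
        have : (((PySem.List.enumerate vs 0).map (fun p => p.2 * wt p.1)).sum + check)
             = (check + ((PySem.List.enumerate vs 0).map (fun p => p.2 * wt p.1)).sum) := by ring
        rw [this]
      · rw [if_neg h13, if_neg h13]
        rw [mod_equiv _ check hb.1 hb.2, S_else vs, hfold 1]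
        -- length is 8, 12 or 14, so the payload length is odd and its last position is even
        have hlens : ds.length = 7 ∨ ds.length = 11 ∨ ds.length = 13 := by
          have h' : ds.length + 1 = 8 ∨ ds.length + 1 = 12 ∨
              ds.length + 1 = 13 ∨ ds.length + 1 = 14 := by
            simpa using hl
          have h13' : ¬ ds.length + 1 = 13 := by simpa using h13
          omega
        have hw : wt ((vs.length : Int) - 1) = 1 := by
          rw [hvslen]
          rcases hlens with h | h | h <;> rw [h] <;> decide
        rw [← hw, lw_reverse]
        have : (((PySem.List.enumerate vs 0).map (fun p => p.2 * wt p.1)).sum + check)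
             = (check + ((PySem.List.enumerate vs 0).map (fun p => p.2 * wt p.1)).sum) := by ring
        rw [this]
    · -- some character is not a digit: B fails the pre-check, A hits a ValueError
      rw [if_pos (by simp [hdig])]
      have hex : ∃ c ∈ ds ++ [l], ¬ PySem.Chars.isdigit c = true := by
        by_contra hno
        push Not at hno
        apply hdig
        unfold PySem.Chars.strIsdigit
        rw [Bool.and_eq_true]
        exact ⟨by simp, List.all_eq_true.mpr hno⟩
      obtain ⟨c, hcmem, hcnd⟩ := hex
      have hcnone : pvIntOfCharA? c = none := by
        rw [char_int c (hdomall c hcmem), if_neg hcnd]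
      rw [PySem.List.slice_to_neg_one, List.dropLast_concat,
        PySem.List.pyGet?_neg_one_append_singleton]
      rcases List.mem_append.mp hcmem with hin | hin
      · rw [mapM_none ds c hin hcnone]
      · have hcl : c = l := by simpa using hin
        subst hcl
        rw [Option.bind_some, hcnone]
        cases ds.mapM pvIntOfCharA? <;> rfl
  · rw [if_neg hl, if_pos (Or.inl hl)]
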